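-- pv_equiv track=rewrite | github.com/codersasank/problem-solving | geeks_for_geeks/power_set.py | AllPossibleStrings
-- ===== SOURCE A (Python) =====
-- def AllPossibleStrings(s):
--     n = len(s)
--     ret = list()
--     for i in range(1,2**n):
--         num = i
--         temp_str = list()
--         for j in range(n):
--             bit = num%2
--             if bit==1:
--                 temp_str.append(s[j])
--             num = num>>1
--         temp_str = ''.join(temp_str)
--         ret.append(temp_str)
--     return sorted(ret)
-- ===== SOURCE B (Python) =====
-- def AllPossibleStrings(s):
--     out = []
--     n = len(s)
--     def rec(i, prefix):
--         if i == n: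
--             out.append(prefix)
--             return
--         rec(i + 1, prefix)
--         rec(i + 1, prefix + s[i])
--     rec(0, "")
--     return sorted(x for x in out if x)
-- ===== Notes on version B (the rewrite author's own statement) =====
-- stated objective: alternative
-- what changed: Replaced A's bitmask enumeration (for each i in 1..2^n-1, extract bits of i to pick characters) by a recursive include/exclude power-set builder that records each accumulated prefix at the end of the string, then filters out the empty subset and sorts.
import Mathlib
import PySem

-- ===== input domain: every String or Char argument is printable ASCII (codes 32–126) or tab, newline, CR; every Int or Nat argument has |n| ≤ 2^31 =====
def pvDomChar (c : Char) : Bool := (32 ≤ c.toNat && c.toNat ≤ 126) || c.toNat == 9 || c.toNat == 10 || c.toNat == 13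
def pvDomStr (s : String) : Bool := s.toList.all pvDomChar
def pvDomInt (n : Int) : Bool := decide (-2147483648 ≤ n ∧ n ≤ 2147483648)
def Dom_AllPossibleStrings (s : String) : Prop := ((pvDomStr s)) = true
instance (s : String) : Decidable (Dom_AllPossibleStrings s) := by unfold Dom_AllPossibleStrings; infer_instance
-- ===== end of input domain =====

-- B replaces A's bitmask enumeration of subsets by a recursive include/exclude
-- builder over the characters (objective: alternative — same output, different algorithm).

-- ===== PORT A =====
-- Literal port of A: for i in range(1, 2**n) extract the bits of i, collecting s[j]
-- for each set bit j, join, append; finally sorted(ret).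
def AllPossibleStrings (s : String) : List String :=
  let cs := s.toList
  let n := cs.length
  let ret :=
    (PySem.List.pyRange 1 ((2:Int) ^ n) 1).foldl
      (fun ret i =>
        let st :=
          (PySem.List.pyRange 0 ((cs.length : Int)) 1).foldl
            (fun (acc : List Char × Int) j =>
              ((if PySem.Int.mod acc.2 2 = 1 then acc.1 ++ [PySem.List.pyGetD cs j ' '] else acc.1),
                acc.2 >>> (1 : Nat)))
            ([], i)
        ret ++ [String.mk st.1]) []
  PySem.List.sorted ret (fun x => x) false

-- ===== PORT B =====
-- rec(i, prefix): at each character either skip it or append it, recording the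
-- accumulated prefix at the end of the string (structural recursion on the
-- remaining characters ↔ the Python index recursion).
def pvRec : List Char → List Char → List (List Char)
  | [], pre => [pre]
  | c :: rest, pre => pvRec rest pre ++ pvRec rest (pre ++ [c])

def AllPossibleStrings_alt (s : String) : List String :=
  PySem.List.sorted (((pvRec s.toList []).filter (fun p => !p.isEmpty)).map String.mk)
    (fun x => x) false

-- ===== PRECONDITION & SPEC =====
def Spec_AllPossibleStrings (s : String) (out : List String) : Prop := out = AllPossibleStrings_alt s
instance (s : String) (out : List String) : Decidable (Spec_AllPossibleStrings s out) := by unfold Spec_AllPossibleStrings; infer_instance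

-- ===== CLAIM (what is proved, stated in full; the proofs are below) =====
def Claim_equal_AllPossibleStrings : Prop := ∀ (s : String), Dom_AllPossibleStrings s → Spec_AllPossibleStrings s (AllPossibleStrings s)

-- ===== LEMMAS AND PROOFS =====

-- the subset of cs selected by the low bits of m
def pvSubsetF : List Char → Nat → List Char
  | [], _ => []
  | c :: cs, m => (if m % 2 = 1 then [c] else []) ++ pvSubsetF cs (m / 2)

lemma pvSubsetF_zero (cs : List Char) : pvSubsetF cs 0 = [] := by
  induction cs with
  | nil => rfl
  | cons c cs ih => simp [pvSubsetF, ih]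

lemma pvSubsetF_even (c : Char) (cs : List Char) (k : Nat) :
    pvSubsetF (c :: cs) (2 * k) = pvSubsetF cs k := by
  have h : (2 * k) % 2 = 0 := by omega
  have h2 : (2 * k) / 2 = k := by omega
  simp [pvSubsetF, h, h2]

lemma pvSubsetF_odd (c : Char) (cs : List Char) (k : Nat) :
    pvSubsetF (c :: cs) (2 * k + 1) = c :: pvSubsetF cs k := by
  have h : (2 * k + 1) % 2 = 1 := by omega
  have h2 : (2 * k + 1) / 2 = k := by omega
  simp [pvSubsetF, h, h2]

lemma pvSubsetF_ne_nil (cs : List Char) : ∀ m : Nat, 1 ≤ m → m < 2 ^ cs.length →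
    pvSubsetF cs m ≠ [] := by
  induction cs with
  | nil => intro m h1 h2; simp at h2; omega
  | cons c cs ih =>
    intro m h1 h2
    by_cases hm : m % 2 = 1
    · simp [pvSubsetF, hm]
    · have hN : 2 ^ (c :: cs).length = 2 * 2 ^ cs.length := by
        simp [List.length_cons, pow_succ]; ring
      simp [pvSubsetF, hm]
      exact ih (m / 2) (by omega) (by omega)

-- A's inner bit-extraction loop computes pvSubsetF
lemma innerLoop_eq (cs : List Char) : ∀ (m : Nat) (t : List Char),
    cs.foldl
      (fun (acc : List Char × Int) c =>
        ((if PySem.Int.mod acc.2 2 = 1 then acc.1 ++ [c] else acc.1), acc.2 >>> (1 : Nat)))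
      (t, (m : Int))
    = (t ++ pvSubsetF cs m, ((m >>> cs.length : Nat) : Int)) := by
  induction cs with
  | nil => intro m t; simp [pvSubsetF]
  | cons c cs ih =>
    intro m t
    have h2 : PySem.Int.mod (m : Int) 2 = ((m % 2 : Nat) : Int) := by
      exact_mod_cast PySem.Int.mod_natCast m 2
    have hs : ((m : Int) >>> (1 : Nat)) = ((m / 2 : Nat) : Int) := by
      rw [Int.shiftRight_eq_div_pow]; omega
    have hsh : m >>> (c :: cs).length = (m / 2) >>> cs.length := by
      rw [List.length_cons, Nat.add_comm, Nat.shiftRight_add, Nat.shiftRight_one]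
    simp only [List.foldl_cons, h2, hs]
    by_cases hm : m % 2 = 1
    · have : ((m % 2 : Nat) : Int) = 1 := by omega
      rw [if_pos this, ih, hsh]
      simp [pvSubsetF, hm]
    · have : ¬ ((m % 2 : Nat) : Int) = 1 := by omega
      rw [if_neg this, ih, hsh]
      simp [pvSubsetF, hm]

-- closed form for A before sorting
lemma A_eq (s : String) :
    AllPossibleStrings s =
      PySem.List.sorted
        (((List.range (2 ^ s.toList.length - 1)).map (fun k => pvSubsetF s.toList (k + 1))).map
          String.mk)
        (fun x => x) false := by
  unfold AllPossibleStrings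
  simp only [PySem.List.foldl_pyRange_zero_pyGetD' s.toList ' '
    (fun (acc : List Char × Int) c =>
      ((if PySem.Int.mod acc.2 2 = 1 then acc.1 ++ [c] else acc.1), acc.2 >>> (1 : Nat)))]
  rw [PySem.List.foldl_append_singleton_eq_map, PySem.List.pyRange_one]
  have hc : ((2:Int) ^ s.toList.length) = ((2 ^ s.toList.length : Nat) : Int) := by
    push_cast; ring
  have hb : (((2:Int) ^ s.toList.length - 1)).toNat = 2 ^ s.toList.length - 1 := by
    have : (1:Nat) ≤ 2 ^ s.toList.length := Nat.one_le_two_pow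
    rw [hc]; omega
  rw [hb]
  simp only [List.map_map, List.nil_append]
  congr 1
  apply List.map_congr_left
  intro k _
  have hcast : ((1 : Int) + (k : Int)) = (((k + 1 : Nat)) : Int) := by push_cast; ring
  simp only [Function.comp, hcast, innerLoop_eq s.toList (k + 1) []]
  simp

lemma pvRec_prefix (cs : List Char) : ∀ p, pvRec cs p = (pvRec cs []).map (p ++ ·) := by
  induction cs with
  | nil => intro p; simp [pvRec]
  | cons c cs ih =>
    intro p
    have h := ih [c]
    simp only [pvRec, List.nil_append] at h ⊢
    rw [ih p, ih (p ++ [c]), h, List.map_append, List.map_map]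
    congr 1
    apply List.map_congr_left
    intro x _
    simp

lemma range_double_perm (N : Nat) :
    (List.range (2 * N)).Perm
      ((List.range N).map (fun k => 2 * k) ++ (List.range N).map (fun k => 2 * k + 1)) := by
  apply (List.perm_ext_iff_of_nodup (List.nodup_range) ?_).mpr
  · intro a
    simp only [List.mem_range, List.mem_append, List.mem_map]
    constructor
    · intro ha
      rcases Nat.even_or_odd a with ⟨k, hk⟩ | ⟨k, hk⟩
      · exact Or.inl ⟨k, by omega, by omega⟩
      · exact Or.inr ⟨k, by omega, by omega⟩
    · rintro (⟨k, hk, rfl⟩ | ⟨k, hk, rfl⟩) <;> omega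
  · apply List.Nodup.append
    · exact List.nodup_range.map (fun a b h => by omega)
    · exact List.nodup_range.map (fun a b h => by omega)
    · intro x hx hy
      simp only [List.mem_map, List.mem_range] at hx hy
      obtain ⟨k, _, rfl⟩ := hx
      obtain ⟨j, _, hj⟩ := hy
      omega

lemma pvRec_perm (cs : List Char) :
    (pvRec cs []).Perm ((List.range (2 ^ cs.length)).map (pvSubsetF cs)) := by
  induction cs with
  | nil => simp [pvRec, pvSubsetF]
  | cons c cs ih =>
    have h1 : pvRec (c :: cs) [] = pvRec cs [] ++ (pvRec cs []).map (fun x => c :: x) := by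
      simp only [pvRec, List.nil_append, pvRec_prefix cs [c]]
      simp
    have hN : 2 ^ (c :: cs).length = 2 * 2 ^ cs.length := by
      simp [List.length_cons, pow_succ]; ring
    rw [h1, hN]
    refine (ih.append (ih.map (fun x => c :: x))).trans ?_
    have h2 := (range_double_perm (2 ^ cs.length)).map (pvSubsetF (c :: cs))
    have h3 : ((List.range (2 ^ cs.length)).map (fun k => 2 * k)
          ++ (List.range (2 ^ cs.length)).map (fun k => 2 * k + 1)).map (pvSubsetF (c :: cs))
        = (List.range (2 ^ cs.length)).map (pvSubsetF cs)
          ++ ((List.range (2 ^ cs.length)).map (pvSubsetF cs)).map (fun x => c :: x) := by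
      rw [List.map_append]
      congr 1
      · simp only [List.map_map]
        apply List.map_congr_left
        intro k _
        simp [Function.comp, pvSubsetF_even]
      · simp only [List.map_map]
        apply List.map_congr_left
        intro k _
        simp [Function.comp, pvSubsetF_odd]
    rw [← h3]
    exact h2.symm

lemma filter_lemma (cs : List Char) :
    ((List.range (2 ^ cs.length)).map (pvSubsetF cs)).filter (fun p => !p.isEmpty)
      = (List.range (2 ^ cs.length - 1)).map (fun k => pvSubsetF cs (k + 1)) := by
  have hN : 2 ^ cs.length = (2 ^ cs.length - 1) + 1 := by
    have : (1:Nat) ≤ 2 ^ cs.length := Nat.one_le_two_pow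
    omega
  rw [hN, List.range_succ_eq_map]
  simp only [List.map_cons, List.filter_cons, pvSubsetF_zero, List.isEmpty_nil, Bool.not_true,
    List.map_map]
  rw [List.filter_eq_self.mpr]
  · apply List.map_congr_left; intro k _; simp [Function.comp]
  · intro x hx
    simp only [List.mem_map, List.mem_range, Function.comp] at hx
    obtain ⟨k, hk, rfl⟩ := hx
    have hne : pvSubsetF cs (k + 1) ≠ [] :=
      pvSubsetF_ne_nil cs (k + 1) (by omega) (by omega)
    simpa [List.isEmpty_iff] using hne

-- ===== VERDICT (by name: the statement is the Claim_ definition above) =====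
theorem AllPossibleStrings_spec : Claim_equal_AllPossibleStrings := by
  intro s _
  unfold Spec_AllPossibleStrings AllPossibleStrings_alt
  rw [A_eq]
  apply PySem.List.sorted_eq_sorted_of_perm _ _ _ (fun a b h => h)
  apply List.Perm.map
  rw [← filter_lemma]
  exact ((pvRec_perm s.toList).filter _).symm
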